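-- pv_equiv track=rewrite | github.com/manassevisser-dot/huishoudApp | chats/rawdata/manasse/vanalles/brace_audit (1).py | _index_to_line_col
-- ===== SOURCE A (Python) =====
-- from typing import List, Optional, Dict, Any, Tuple
--
-- def _index_to_line_col(text: str, index: int) -> Tuple[int, int]:
--     """Converteer 1-based tekstindex naar (regel, kolom), beide 1-based."""
--     i0 = index - 1
--     lines = text.splitlines(True)
--     cum = 0
--     for ln, seg in enumerate(lines, start=1):
--         if cum + len(seg) > i0:
--             col = i0 - cum + 1
--             return ln, col
--         cum += len(seg)
--     return (len(lines), max(1, len(lines[-1]) if lines else 1))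
-- ===== SOURCE B (Python) =====
-- def _index_to_line_col(text, index):
--     """Converteer 1-based tekstindex naar (regel, kolom), beide 1-based."""
--     i0 = index - 1
--     lines = text.splitlines(True)
--     # prefix sums of cumulative end offsets
--     ends = []
--     c = 0
--     for seg in lines:
--         c += len(seg)
--         ends.append(c)
--     # hand-written bisect_right: first k with ends[k] > i0
--     lo, hi = 0, len(ends)
--     while lo < hi:
--         mid = (lo + hi) // 2
--         if ends[mid] > i0:
--             hi = mid
--         else:
--             lo = mid + 1
--     if lo < len(ends):
--         start = ends[lo - 1] if lo > 0 else 0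
--         return lo + 1, i0 - start + 1
--     return (len(lines), max(1, len(lines[-1]) if lines else 1))
-- ===== Notes on version B (the rewrite author's own statement) =====
-- stated objective: alternative
-- what changed: Replaces A's linear scan with accumulator over the kept-ends line segments by building a prefix-sum list of cumulative line-end offsets once and locating the line with a hand-written bisect_right binary search.
import Mathlib
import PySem

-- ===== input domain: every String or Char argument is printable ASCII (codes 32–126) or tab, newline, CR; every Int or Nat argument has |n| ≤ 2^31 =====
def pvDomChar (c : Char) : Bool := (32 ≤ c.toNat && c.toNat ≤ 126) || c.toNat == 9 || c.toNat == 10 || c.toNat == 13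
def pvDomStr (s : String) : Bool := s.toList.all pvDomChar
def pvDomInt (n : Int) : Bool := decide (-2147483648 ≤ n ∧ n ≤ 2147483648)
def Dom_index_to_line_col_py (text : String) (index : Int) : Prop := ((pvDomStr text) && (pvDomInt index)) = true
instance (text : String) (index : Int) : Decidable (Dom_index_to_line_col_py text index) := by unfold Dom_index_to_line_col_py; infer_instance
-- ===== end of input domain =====

-- B replaces A's linear scan over the line segments by a prefix-sum list of
-- cumulative end offsets plus a hand-written binary search (bisect_right);
-- objective: alternative decomposition (same observable behaviour).


-- ===== PORT A =====

-- text.splitlines(True) (keepends), ported by hand: exact on the Dom alphabet,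
-- where the only line breaks are '\n', '\r' and '\r\n' (PySem.Str.splitlines drops ends).
def pySplitKeep : List Char → List Char → List (List Char)
  | [], acc => if acc.isEmpty then [] else [acc.reverse]
  | '\r' :: '\n' :: rest, acc => (acc.reverse ++ ['\r', '\n']) :: pySplitKeep rest []
  | '\r' :: rest, acc => (acc.reverse ++ ['\r']) :: pySplitKeep rest []
  | '\n' :: rest, acc => (acc.reverse ++ ['\n']) :: pySplitKeep rest []
  | c :: rest, acc => pySplitKeep rest (c :: acc)

-- the shared fallback line: (len(lines), max(1, len(lines[-1]) if lines else 1))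
def idxFallback (lines : List (List Char)) : Int × Int :=
  ((lines.length : Int),
   max 1 (match PySem.List.pyGet? lines (-1) with
          | some s => (s.length : Int)
          | none => 1))

-- the 'for ln, seg in enumerate(lines, start=1)' loop; none = loop fell through
def idxLoop (i0 : Int) : List (List Char) → Int → Int → Option (Int × Int)
  | [], _, _ => none
  | seg :: rest, ln, cum =>
    if cum + (seg.length : Int) > i0 then some (ln, i0 - cum + 1)
    else idxLoop i0 rest (ln + 1) (cum + (seg.length : Int))

def index_to_line_col_py (text : String) (index : Int) : Int × Int :=
  let i0 := index - 1
  let lines := pySplitKeep text.toList []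
  match idxLoop i0 lines 1 0 with
  | some r => r
  | none => idxFallback lines

-- ===== PORT B =====

-- ends: cumulative end offsets of the kept-ends segments
def buildEnds : List (List Char) → Int → List Int
  | [], _ => []
  | seg :: rest, c => (c + (seg.length : Int)) :: buildEnds rest (c + (seg.length : Int))

-- hand-written bisect_right: first k in [lo,hi) with ends[k] > i0, else hi
def bsearch (ends : List Int) (i0 : Int) (lo hi : Nat) : Nat :=
  if _h : lo < hi then
    let mid := (lo + hi) / 2
    if ends.getD mid 0 > i0 then bsearch ends i0 lo mid
    else bsearch ends i0 (mid + 1) hi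
  else lo
termination_by hi - lo
decreasing_by all_goals omega

def index_to_line_col_py_alt (text : String) (index : Int) : Int × Int :=
  let i0 := index - 1
  let lines := pySplitKeep text.toList []
  let ends := buildEnds lines 0
  let lo := bsearch ends i0 0 ends.length
  if lo < ends.length then
    let start := if lo > 0 then ends.getD (lo - 1) 0 else 0
    ((lo : Int) + 1, i0 - start + 1)
  else idxFallback lines

-- ===== PRECONDITION & SPEC =====
def Spec_index_to_line_col_py (text : String) (index : Int) (out : Int × Int) : Prop := out = index_to_line_col_py_alt text index
instance (text : String) (index : Int) (out : Int × Int) : Decidable (Spec_index_to_line_col_py text index out) := by unfold Spec_index_to_line_col_py; infer_instance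

-- ===== CLAIM (what is proved, stated in full; the proofs are below) =====
def Claim_equal_index_to_line_col_py : Prop := ∀ (text : String) (index : Int), Dom_index_to_line_col_py text index → Spec_index_to_line_col_py text index (index_to_line_col_py text index)

-- ===== LEMMAS AND PROOFS =====

lemma buildEnds_length (segs : List (List Char)) : ∀ c, (buildEnds segs c).length = segs.length := by
  induction segs with
  | nil => intro c; rfl
  | cons s rest ih => intro c; simp [buildEnds, ih]

lemma buildEnds_lower (segs : List (List Char)) :
    ∀ c k, k < segs.length → c ≤ (buildEnds segs c).getD k 0 := by
  induction segs with
  | nil => intro c k h; simp at h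
  | cons s rest ih =>
    intro c k h
    cases k with
    | zero => simp [buildEnds]
    | succ k' =>
      simp only [buildEnds, List.getD_cons_succ]
      have := ih (c + (s.length : Int)) k' (by simpa using h)
      omega

lemma buildEnds_mono (segs : List (List Char)) :
    ∀ c j k, j ≤ k → k < segs.length →
      (buildEnds segs c).getD j 0 ≤ (buildEnds segs c).getD k 0 := by
  induction segs with
  | nil => intro c j k _ h; simp at h
  | cons s rest ih =>
    intro c j k hjk hk
    cases k with
    | zero => interval_cases j; rfl
    | succ k' =>
      cases j with
      | zero =>
        simp only [buildEnds, List.getD_cons_zero, List.getD_cons_succ]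
        exact buildEnds_lower rest (c + (s.length : Int)) k' (by simpa using hk)
      | succ j' =>
        simp only [buildEnds, List.getD_cons_succ]
        exact ih (c + (s.length : Int)) j' k' (by omega) (by simpa using hk)

lemma bsearch_step (ends : List Int) (i0 : Int) (lo hi : Nat) (h : lo < hi) :
    bsearch ends i0 lo hi =
      if ends.getD ((lo + hi) / 2) 0 > i0 then bsearch ends i0 lo ((lo + hi) / 2)
      else bsearch ends i0 ((lo + hi) / 2 + 1) hi := by
  rw [bsearch]; simp [h]

lemma bsearch_base (ends : List Int) (i0 : Int) (lo hi : Nat) (h : ¬ lo < hi) :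
    bsearch ends i0 lo hi = lo := by
  rw [bsearch]; simp [h]

-- binary-search invariant: everything below the result is ≤ i0, everything from it on is > i0
lemma bsearch_spec (ends : List Int) (i0 : Int)
    (mono : ∀ j k, j ≤ k → k < ends.length → ends.getD j 0 ≤ ends.getD k 0) :
    ∀ n lo hi, hi - lo = n → lo ≤ hi → hi ≤ ends.length →
      (∀ j, j < lo → ends.getD j 0 ≤ i0) →
      (∀ j, hi ≤ j → j < ends.length → i0 < ends.getD j 0) →
      bsearch ends i0 lo hi ≤ ends.length ∧
      (∀ j, j < bsearch ends i0 lo hi → ends.getD j 0 ≤ i0) ∧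
      (∀ j, bsearch ends i0 lo hi ≤ j → j < ends.length → i0 < ends.getD j 0) := by
  intro n
  induction n using Nat.strong_induction_on with
  | _ n ih =>
    intro lo hi hn hle hhi hlow hhigh
    by_cases h : lo < hi
    · rw [bsearch_step ends i0 lo hi h]
      by_cases hc : ends.getD ((lo + hi) / 2) 0 > i0
      · rw [if_pos hc]
        exact ih ((lo + hi) / 2 - lo) (by omega) lo ((lo + hi) / 2) rfl (by omega) (by omega)
          hlow (fun j hj hjlen => lt_of_lt_of_le hc (mono ((lo + hi) / 2) j hj hjlen))
      · rw [if_neg hc]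
        exact ih (hi - ((lo + hi) / 2 + 1)) (by omega) ((lo + hi) / 2 + 1) hi rfl (by omega) hhi
          (fun j hj => le_trans (mono j ((lo + hi) / 2) (by omega) (by omega)) (by omega))
          hhigh
    · rw [bsearch_base ends i0 lo hi h]
      exact ⟨by omega, fun j hj => hlow j hj, fun j hj hjl => hhigh j (by omega) hjl⟩

-- A's loop computed from any r satisfying the binary search's characterisation
lemma idxLoop_char (i0 : Int) (segs : List (List Char)) :
    ∀ c ln r, r ≤ segs.length →
      (∀ j, j < r → (buildEnds segs c).getD j 0 ≤ i0) →
      (∀ j, r ≤ j → j < segs.length → i0 < (buildEnds segs c).getD j 0) →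
      idxLoop i0 segs ln c =
        (if r < segs.length then
          some (ln + (r : Int), i0 - (if r > 0 then (buildEnds segs c).getD (r - 1) 0 else c) + 1)
        else none) := by
  induction segs with
  | nil =>
    intro c ln r hr _ _
    simp at hr; simp [idxLoop, hr]
  | cons s rest ih =>
    intro c ln r hr hlow hhigh
    simp only [idxLoop]
    cases r with
    | zero =>
      have h0 := hhigh 0 (by omega) (by simp)
      simp only [buildEnds, List.getD_cons_zero] at h0
      rw [if_pos h0, if_pos (by simp)]
      simp
    | succ r' =>
      have h0 := hlow 0 (by omega)
      simp only [buildEnds, List.getD_cons_zero] at h0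
      rw [if_neg (by omega)]
      have hrec := ih (c + (s.length : Int)) (ln + 1) r' (by simpa using hr)
        (fun j hj => by
          have := hlow (j + 1) (by omega)
          simpa only [buildEnds, List.getD_cons_succ] using this)
        (fun j hj hjl => by
          have := hhigh (j + 1) (by omega) (by simpa using hjl)
          simpa only [buildEnds, List.getD_cons_succ] using this)
      rw [hrec]
      by_cases hlt : r' < rest.length
      · rw [if_pos hlt, if_pos (show r' + 1 < (s :: rest).length by simp only [List.length_cons]; omega)]
        rw [if_pos (Nat.succ_pos r')]
        have hst : (buildEnds (s :: rest) c).getD (r' + 1 - 1) 0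
            = (if r' > 0 then (buildEnds rest (c + (s.length : Int))).getD (r' - 1) 0
               else c + (s.length : Int)) := by
          cases r' with
          | zero => simp [buildEnds]
          | succ r'' => simp [buildEnds]
        rw [hst]
        simp only [Option.some.injEq, Prod.mk.injEq]
        exact ⟨by push_cast; ring, trivial⟩
      · rw [if_neg hlt, if_neg (show ¬ r' + 1 < (s :: rest).length by simp only [List.length_cons]; omega)]

-- the two ports agree on the shared segment list
lemma core_eq (segs : List (List Char)) (i0 : Int) :
    (match idxLoop i0 segs 1 0 with
     | some r => r
     | none => idxFallback segs) =
    (if bsearch (buildEnds segs 0) i0 0 (buildEnds segs 0).length < (buildEnds segs 0).length then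
       ((bsearch (buildEnds segs 0) i0 0 (buildEnds segs 0).length : Int) + 1,
        i0 - (if bsearch (buildEnds segs 0) i0 0 (buildEnds segs 0).length > 0 then
                (buildEnds segs 0).getD (bsearch (buildEnds segs 0) i0 0 (buildEnds segs 0).length - 1) 0
              else 0) + 1)
     else idxFallback segs) := by
  have hlen := buildEnds_length segs 0
  obtain ⟨h1, h2, h3⟩ := bsearch_spec (buildEnds segs 0) i0
    (fun j k hjk hk => buildEnds_mono segs 0 j k hjk (by omega))
    ((buildEnds segs 0).length - 0) 0 (buildEnds segs 0).length rfl (by omega) le_rfl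
    (by omega) (by omega)
  set r := bsearch (buildEnds segs 0) i0 0 (buildEnds segs 0).length with hr
  have hloop := idxLoop_char i0 segs 0 1 r (by omega)
    h2 (fun j hj hjl => h3 j hj (by omega))
  rw [hloop]
  by_cases hlt : r < segs.length
  · rw [if_pos hlt, if_pos (show r < (buildEnds segs 0).length by omega)]
    show (1 + (r : Int), i0 - (if r > 0 then (buildEnds segs 0).getD (r - 1) 0 else 0) + 1) = _
    simp only [Prod.mk.injEq]
    exact ⟨by ring, trivial⟩
  · rw [if_neg hlt, if_neg (show ¬ r < (buildEnds segs 0).length by omega)]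

-- ===== VERDICT (by name: the statement is the Claim_ definition above) =====
theorem index_to_line_col_py_spec : Claim_equal_index_to_line_col_py := by
  intro text index _
  unfold Spec_index_to_line_col_py index_to_line_col_py index_to_line_col_py_alt
  exact core_eq (pySplitKeep text.toList []) (index - 1)
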